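-- pv_equiv track=rewrite | github.com/spadix0/AoC2020 | 16/translate.py | build_lookup
-- ===== SOURCE A (Python) =====
-- from bisect import bisect_left, bisect_right
--
-- def build_lookup(fields):
--     ranges = sorted({
--         v
--         for nm, rngs in fields.items()
--         for r in rngs
--         for v in (r[0], r[1]+1)
--     })
--     names = [ set() for _ in ranges ]
--
--     for nm, rngs in fields.items():
--         for lo, hi in rngs:
--             i0 = bisect_left(ranges, lo)
--             i1 = bisect_left(ranges, hi+1)
--             for i in range(i0, i1):
--                 names[i].add(nm)
--
--     return ranges, names
-- ===== SOURCE B (Python) =====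
-- def build_lookup(fields):
--     ranges = sorted({
--         v
--         for nm, rngs in fields.items()
--         for r in rngs
--         for v in (r[0], r[1]+1)
--     })
--     names = [
--         { nm for nm, rngs in fields.items()
--              if any(lo <= v <= hi for lo, hi in rngs) }
--         for v in ranges
--     ]
--     return ranges, names
-- ===== Notes on version B (the rewrite author's own statement) =====
-- stated objective: simpler
-- what changed: Instead of bisecting the sorted boundary list and mutating per-index sets over each range's index interval, B builds each boundary's name set directly by one comprehension testing whether any of a field's ranges covers that boundary; no bisect, no index arithmetic, no in-place mutation.
import Mathlib
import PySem

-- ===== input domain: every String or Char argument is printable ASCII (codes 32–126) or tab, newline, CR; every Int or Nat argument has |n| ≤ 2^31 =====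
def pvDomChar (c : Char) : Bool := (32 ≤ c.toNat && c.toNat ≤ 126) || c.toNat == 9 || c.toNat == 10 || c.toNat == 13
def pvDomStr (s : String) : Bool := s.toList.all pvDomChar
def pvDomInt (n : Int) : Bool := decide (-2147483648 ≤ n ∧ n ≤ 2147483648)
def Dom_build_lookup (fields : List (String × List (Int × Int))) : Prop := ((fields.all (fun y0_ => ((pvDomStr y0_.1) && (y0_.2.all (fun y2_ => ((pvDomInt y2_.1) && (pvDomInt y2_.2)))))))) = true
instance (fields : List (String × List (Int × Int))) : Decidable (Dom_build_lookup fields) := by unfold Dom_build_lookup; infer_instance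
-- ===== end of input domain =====

-- B replaces A's bisect-and-fill of mutable index slices by a direct per-boundary membership
-- comprehension (simpler: no bisect, no in-place set mutation); same return value.


-- ===== PORT A =====
-- names[i].add(nm) : read names[i], add nm to the set, write it back (exact: i is always in range here)
def pvFillIdx (nm : String) (ns : List (List String)) (i : Int) : List (List String) :=
  PySem.List.pySetD ns i (PySem.Set.add (PySem.List.pyGetD ns i PySem.Set.empty) nm)

-- one (lo, hi) range: i0 = bisect_left(ranges, lo); i1 = bisect_left(ranges, hi+1); fill range(i0, i1)
def pvFillRange (ranges : List Int) (nm : String) (ns : List (List String)) (r : Int × Int) : List (List String) :=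
  (PySem.List.pyRange (PySem.List.bisectLeft ranges r.1 : Int)
    (PySem.List.bisectLeft ranges (r.2 + 1) : Int) 1).foldl (pvFillIdx nm) ns

def pvFillField (ranges : List Int) (ns : List (List String)) (p : String × List (Int × Int)) : List (List String) :=
  p.2.foldl (pvFillRange ranges p.1) ns

def build_lookup (fields : List (String × List (Int × Int))) : List Int × List (List String) :=
  let ranges : List Int :=
    PySem.List.sorted
      (PySem.Set.ofList (fields.flatMap (fun p => p.2.flatMap (fun r => [r.1, r.2 + 1]))))
      (fun v => v)
  let names0 : List (List String) := ranges.map (fun _ => (PySem.Set.empty : PySem.Set String))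
  let names := fields.foldl (pvFillField ranges) names0
  (ranges, names)

-- ===== PORT B =====
-- any(lo <= v <= hi for lo, hi in rngs)
def pvCovers (v : Int) (rngs : List (Int × Int)) : Bool :=
  rngs.any (fun r => decide (r.1 ≤ v) && decide (v ≤ r.2))

def build_lookup_alt (fields : List (String × List (Int × Int))) : List Int × List (List String) :=
  let ranges : List Int :=
    PySem.List.sorted
      (PySem.Set.ofList (fields.flatMap (fun p => p.2.flatMap (fun r => [r.1, r.2 + 1]))))
      (fun v => v)
  let names : List (List String) :=
    ranges.map (fun v =>
      PySem.Set.ofList ((fields.filter (fun p => pvCovers v p.2)).map (fun p => p.1)))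
  (ranges, names)

-- ===== PRECONDITION & SPEC =====
def Spec_build_lookup (fields : List (String × List (Int × Int))) (out : List Int × List (List String)) : Prop := out = build_lookup_alt fields
instance (fields : List (String × List (Int × Int))) (out : List Int × List (List String)) : Decidable (Spec_build_lookup fields out) := by unfold Spec_build_lookup; infer_instance

-- ===== CLAIM (what is proved, stated in full; the proofs are below) =====
def Claim_equal_build_lookup : Prop := ∀ (fields : List (String × List (Int × Int))), Dom_build_lookup fields → Spec_build_lookup fields (build_lookup fields)

-- ===== LEMMAS AND PROOFS =====

lemma pvFillIdx_length (nm : String) (ns : List (List String)) (i : Int) :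
    (pvFillIdx nm ns i).length = ns.length := by
  simp [pvFillIdx, PySem.List.length_pySetD]

lemma pvFoldFillIdx_length (nm : String) (l : List Int) (ns : List (List String)) :
    (l.foldl (pvFillIdx nm) ns).length = ns.length := by
  induction l generalizing ns with
  | nil => rfl
  | cons i l ih => simp [List.foldl_cons, ih, pvFillIdx_length]

-- filling indices a, a+1, …, a+d-1
lemma pvFill_pyRange_get (nm : String) :
    ∀ (d a : Nat) (ns : List (List String)), a + d ≤ ns.length → ∀ (j : Nat), j < ns.length →
      ((PySem.List.pyRange (a : Int) ((a : Int) + (d : Int)) 1).foldl (pvFillIdx nm) ns)[j]? =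
        some (if a ≤ j ∧ j < a + d then PySem.Set.add ns[j]! nm else ns[j]!) := by
  intro d
  induction d with
  | zero =>
    intro a ns _ j hj
    rw [PySem.List.pyRange_one_eq_nil (by omega)]
    simp [List.getElem!_eq_getElem?_getD, List.getElem?_eq_getElem hj]
  | succ d ih =>
    intro a ns hle j hj
    have ha : (a : Int) < (a : Int) + (d + 1 : Nat) := by omega
    rw [PySem.List.pyRange_one_cons ha]
    have hstep : ((a : Int) + 1) = ((a + 1 : Nat) : Int) := by push_cast; ring
    have hd : ((a : Int) + ((d + 1 : Nat) : Int)) = ((a + 1 : Nat) : Int) + (d : Int) := by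
      push_cast; ring
    rw [List.foldl_cons, hd, hstep]
    have halt : a < ns.length := by omega
    have hns' : pvFillIdx nm ns (a : Int) = ns.set a (PySem.Set.add ns[a] nm) := by
      simp [pvFillIdx, PySem.List.pySetD_natCast, PySem.List.pyGetD_natCast,
        List.getD_eq_getElem?_getD, List.getElem?_eq_getElem halt]
    rw [hns']
    have hlen' : (ns.set a (PySem.Set.add ns[a] nm)).length = ns.length := by simp
    rw [ih (a + 1) _ (by omega) j (by omega)]
    by_cases hja : j = a
    · have hA : ¬ (a + 1 ≤ j ∧ j < a + 1 + d) := by omega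
      have hB : (a ≤ j ∧ j < a + (d + 1)) := by omega
      rw [if_neg hA, if_pos hB]
      have hset : (ns.set a (PySem.Set.add ns[a] nm))[j]! = PySem.Set.add ns[a] nm := by
        subst hja; simp [halt]
      rw [hset]
      have h2 : ns[j]! = ns[a] := by subst hja; simp [halt]
      rw [h2]
    · have hset : (ns.set a (PySem.Set.add ns[a] nm))[j]! = ns[j]! := by
        simp [List.getElem!_eq_getElem?_getD, List.getElem?_set_ne (by omega : a ≠ j)]
      rw [hset]
      have hiff : (a + 1 ≤ j ∧ j < a + 1 + d) ↔ (a ≤ j ∧ j < a + (d + 1)) := by omega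
      simp only [hiff]

-- one range (lo, hi): index j gets nm exactly when lo ≤ ranges[j] ≤ hi
lemma pvFillRange_get (ranges : List Int) (hs : ranges.Pairwise (· ≤ ·))
    (nm : String) (r : Int × Int) (ns : List (List String)) (hlen : ns.length = ranges.length)
    (j : Nat) (hj : j < ns.length) :
    (pvFillRange ranges nm ns r)[j]? =
      some (if r.1 ≤ ranges[j]'(hlen ▸ hj) ∧ ranges[j]'(hlen ▸ hj) ≤ r.2
            then PySem.Set.add ns[j]! nm else ns[j]!) := by
  have h0 := PySem.List.bisectLeft_spec ranges r.1 hs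
  have h1 := PySem.List.bisectLeft_spec ranges (r.2 + 1) hs
  set i0 := PySem.List.bisectLeft ranges r.1 with hi0
  set i1 := PySem.List.bisectLeft ranges (r.2 + 1) with hi1
  have hjr : j < ranges.length := hlen ▸ hj
  unfold pvFillRange
  rw [← hi0, ← hi1]
  by_cases hord : i0 ≤ i1
  · have hcast : (i1 : Int) = (i0 : Int) + ((i1 - i0 : Nat) : Int) := by omega
    rw [hcast, pvFill_pyRange_get nm (i1 - i0) i0 ns (by omega) j hj]
    congr 1
    have hc : (i0 ≤ j ∧ j < i0 + (i1 - i0)) ↔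
        (r.1 ≤ ranges[j]'hjr ∧ ranges[j]'hjr ≤ r.2) := by
      constructor
      · rintro ⟨hA, hB⟩
        exact ⟨h0.2.2 j hjr hA, by have := h1.2.1 j hjr (by omega); omega⟩
      · rintro ⟨hA, hB⟩
        constructor
        · by_contra hlt
          have := h0.2.1 j hjr (by omega); omega
        · have : j < i1 := by
            by_contra hge
            have := h1.2.2 j hjr (by omega); omega
          omega
    simp only [hc]
  · have hnil : PySem.List.pyRange (i0 : Int) (i1 : Int) 1 = [] :=
      PySem.List.pyRange_one_eq_nil (by exact_mod_cast Nat.le_of_lt (by omega))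
    rw [hnil]
    simp only [List.foldl_nil]
    have hfalse : ¬ (r.1 ≤ ranges[j]'hjr ∧ ranges[j]'hjr ≤ r.2) := by
      rintro ⟨hA, hB⟩
      have hji1 : j < i1 ∨ i1 ≤ j := by omega
      have h1' : j < i1 := by
        by_contra hge
        have := h1.2.2 j hjr (by omega); omega
      have h0' : i0 ≤ j := by
        by_contra hlt
        have := h0.2.1 j hjr (by omega); omega
      omega
    simp [hfalse, List.getElem!_eq_getElem?_getD, List.getElem?_eq_getElem hj]

lemma pvFillRange_length (ranges : List Int) (nm : String) (ns : List (List String)) (r : Int × Int) :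
    (pvFillRange ranges nm ns r).length = ns.length := by
  unfold pvFillRange
  exact pvFoldFillIdx_length nm _ ns

-- one field (nm, rngs): index j gets nm exactly when some range of the field covers ranges[j]
lemma pvFillField_get (ranges : List Int) (hs : ranges.Pairwise (· ≤ ·)) (nm : String) :
    ∀ (rngs : List (Int × Int)) (ns : List (List String)) (hlen : ns.length = ranges.length)
      (j : Nat) (hj : j < ns.length),
      (rngs.foldl (pvFillRange ranges nm) ns)[j]? =
        some (if pvCovers (ranges[j]'(by omega)) rngs then PySem.Set.add ns[j]! nm else ns[j]!) := by
  intro rngs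
  induction rngs with
  | nil =>
    intro ns hlen j hj
    simp [pvCovers, List.getElem!_eq_getElem?_getD, List.getElem?_eq_getElem hj]
  | cons r rest ih =>
    intro ns hlen j hj
    rw [List.foldl_cons]
    have hlen' : (pvFillRange ranges nm ns r).length = ns.length := pvFillRange_length ranges nm ns r
    rw [ih (pvFillRange ranges nm ns r) (by omega) j (by omega)]
    have hget := pvFillRange_get ranges hs nm r ns hlen j hj
    have hget' : (pvFillRange ranges nm ns r)[j]! =
        (if r.1 ≤ ranges[j]'(hlen ▸ hj) ∧ ranges[j]'(hlen ▸ hj) ≤ r.2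
         then PySem.Set.add ns[j]! nm else ns[j]!) := by
      rw [List.getElem!_eq_getElem?_getD, hget]; rfl
    rw [hget']
    have hidem : PySem.Set.add (PySem.Set.add ns[j]! nm) nm = PySem.Set.add ns[j]! nm :=
      PySem.Set.add_of_mem (by rw [PySem.Set.mem_add]; right; rfl)
    have hcons : pvCovers (ranges[j]'(hlen ▸ hj)) (r :: rest) =
        ((decide (r.1 ≤ ranges[j]'(hlen ▸ hj)) && decide (ranges[j]'(hlen ▸ hj) ≤ r.2)) ||
          pvCovers (ranges[j]'(hlen ▸ hj)) rest) := by
      simp [pvCovers]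
    rw [hcons]
    by_cases hcr : r.1 ≤ ranges[j]'(hlen ▸ hj) ∧ ranges[j]'(hlen ▸ hj) ≤ r.2
    · rw [if_pos hcr]
      have hb : (decide (r.1 ≤ ranges[j]'(hlen ▸ hj)) && decide (ranges[j]'(hlen ▸ hj) ≤ r.2)) = true := by
        simp [hcr.1, hcr.2]
      rw [hb, Bool.true_or, if_pos rfl]
      by_cases hrest : pvCovers (ranges[j]'(hlen ▸ hj)) rest = true
      · rw [if_pos hrest, hidem]
      · rw [if_neg hrest]
    · rw [if_neg hcr]
      have hb : (decide (r.1 ≤ ranges[j]'(hlen ▸ hj)) && decide (ranges[j]'(hlen ▸ hj) ≤ r.2)) = false := by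
        rcases Decidable.not_and_iff_not_or_not.mp hcr with h | h <;> simp [h]
      rw [hb, Bool.false_or]

lemma pvFillField_length (ranges : List Int) (ns : List (List String)) (p : String × List (Int × Int)) :
    (pvFillField ranges ns p).length = ns.length := by
  unfold pvFillField
  induction p.2 generalizing ns with
  | nil => rfl
  | cons r rest ih => rw [List.foldl_cons, ih, pvFillRange_length]

lemma pvFoldFields_length (ranges : List Int) (fs : List (String × List (Int × Int)))
    (ns : List (List String)) :
    (fs.foldl (pvFillField ranges) ns).length = ns.length := by
  induction fs generalizing ns with
  | nil => rfl
  | cons p rest ih => rw [List.foldl_cons, ih, pvFillField_length]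

-- the whole fill loop: index j ends as ns[j].update([nm for covering fields])
lemma pvFoldFields_get (ranges : List Int) (hs : ranges.Pairwise (· ≤ ·)) :
    ∀ (fs : List (String × List (Int × Int))) (ns : List (List String))
      (hlen : ns.length = ranges.length) (j : Nat) (hj : j < ns.length),
      (fs.foldl (pvFillField ranges) ns)[j]? =
        some (PySem.Set.update ns[j]!
          ((fs.filter (fun p => pvCovers (ranges[j]'(by omega)) p.2)).map (fun p => p.1))) := by
  intro fs
  induction fs with
  | nil =>
    intro ns hlen j hj
    simp [PySem.Set.update, List.getElem?_eq_getElem hj]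
  | cons p rest ih =>
    intro ns hlen j hj
    rw [List.foldl_cons]
    have hlen' : (pvFillField ranges ns p).length = ns.length := pvFillField_length ranges ns p
    rw [ih (pvFillField ranges ns p) (by omega) j (by omega)]
    have hget := pvFillField_get ranges hs p.1 p.2 ns hlen j hj
    have hget' : (pvFillField ranges ns p)[j]! =
        (if pvCovers (ranges[j]'(hlen ▸ hj)) p.2 then PySem.Set.add ns[j]! p.1 else ns[j]!) := by
      rw [List.getElem!_eq_getElem?_getD]
      unfold pvFillField at *
      rw [hget]; rfl
    rw [hget']
    by_cases hcov : pvCovers (ranges[j]'(hlen ▸ hj)) p.2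
    · simp only [List.filter_cons, hcov, if_true, List.map_cons, PySem.Set.update_cons]
    · simp only [List.filter_cons, hcov, Bool.false_eq_true, if_false]

-- ===== VERDICT (by name: the statement is the Claim_ definition above) =====
theorem build_lookup_spec : Claim_equal_build_lookup := by
  intro fields _
  unfold Spec_build_lookup build_lookup build_lookup_alt
  set ranges : List Int :=
    PySem.List.sorted
      (PySem.Set.ofList (fields.flatMap (fun p => p.2.flatMap (fun r => [r.1, r.2 + 1]))))
      (fun v => v) with hranges
  have hslt : ranges.Pairwise (· < ·) := by
    rw [hranges]
    exact PySem.List.sorted_ofList_pairwise_lt _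
  have hs : ranges.Pairwise (· ≤ ·) := hslt.imp (fun h => le_of_lt h)
  refine Prod.ext rfl ?_
  simp only
  set names0 : List (List String) := ranges.map (fun _ => (PySem.Set.empty : PySem.Set String)) with hn0
  have hlen0 : names0.length = ranges.length := by simp [hn0]
  apply List.ext_getElem?
  intro j
  by_cases hj : j < ranges.length
  · rw [pvFoldFields_get ranges hs fields names0 hlen0 j (by omega)]
    have h0j : names0[j]! = ([] : List String) := by
      simp [hn0, hj]
    rw [h0j]
    rw [List.getElem?_map, List.getElem?_eq_getElem hj]
    simp only [Option.map_some]
    rw [PySem.Set.update_nil_left]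
  · have h1 : (fields.foldl (pvFillField ranges) names0).length ≤ j := by
      rw [pvFoldFields_length, hlen0]; omega
    have h2 : (ranges.map (fun v =>
        PySem.Set.ofList ((fields.filter (fun p => pvCovers v p.2)).map (fun p => p.1)))).length ≤ j := by
      simp; omega
    rw [List.getElem?_eq_none h1, List.getElem?_eq_none h2]
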